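-- pv_equiv track=rewrite | github.com/ChongWei905/demo-index | DemoIndex/build_md_pageindex.py | group_line_ranges_by_page
-- ===== SOURCE A (Python) =====
-- def group_line_ranges_by_page(page_by_line: list[int]) -> list[tuple[int, int, int]]:
--     """将 ``parse_page_comments`` 结果合并为连续行区间。
--
--     入参:
--         page_by_line: 与全文行等长的页码列表，通常来自 ``parse_page_comments(lines)``。
--
--     返回:
--         ``(page_num, start, end)`` 元组列表；``start``/``end`` 为 0 起始、闭区间行下标。
--     """
--     if not page_by_line:
--         return []
--     out: list[tuple[int, int, int]] = []
--     start = 0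
--     p = page_by_line[0]
--     for i in range(1, len(page_by_line)):
--         if page_by_line[i] != p:
--             out.append((p, start, i - 1))
--             start = i
--             p = page_by_line[i]
--     out.append((p, start, len(page_by_line) - 1))
--     return out
-- ===== SOURCE B (Python) =====
-- def group_line_ranges_by_page(page_by_line: list[int]) -> list[tuple[int, int, int]]:
--     """Run-splitting: for each position i, scan forward to the end j of the run of
--     pages equal to page_by_line[i], emit (page, i, j-1), and continue from j
--     (vs A's single loop carrying (out, start, current-page) boundary state)."""
--     out = []
--     n = len(page_by_line)
--     i = 0
--     while i < n:
--         j = i + 1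
--         while j < n and page_by_line[j] == page_by_line[i]:
--             j += 1
--         out.append((page_by_line[i], i, j - 1))
--         i = j
--     return out
-- ===== Notes on version B (the rewrite author's own statement) =====
-- stated objective: alternative
-- what changed: Replaced A's single boundary-tracking loop carrying (out, start, current-page) state with a run-splitting scanner: an outer loop over run starts and an inner scan to each run's end.
import Mathlib
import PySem

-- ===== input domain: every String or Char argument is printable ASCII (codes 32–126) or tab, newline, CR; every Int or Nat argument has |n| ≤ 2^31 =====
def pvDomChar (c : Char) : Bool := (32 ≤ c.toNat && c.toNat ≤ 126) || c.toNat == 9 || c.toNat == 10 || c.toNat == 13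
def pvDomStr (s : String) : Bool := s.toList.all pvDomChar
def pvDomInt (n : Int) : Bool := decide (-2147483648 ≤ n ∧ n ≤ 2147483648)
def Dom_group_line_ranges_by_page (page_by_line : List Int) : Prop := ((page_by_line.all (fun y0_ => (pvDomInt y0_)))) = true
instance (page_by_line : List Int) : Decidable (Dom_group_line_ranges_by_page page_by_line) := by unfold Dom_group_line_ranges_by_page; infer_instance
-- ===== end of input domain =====

-- B replaces A's single boundary-tracking index loop with stateless recursive run-splitting; objective: alternative decomposition, same cost.


-- ===== PORT A =====
-- loop body of A's 'for i in range(1, len(page_by_line))'; pyGet? is none only off-range (unreachable for i in the range)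
def pvStepA (l : List Int) (st : List (Int × Int × Int) × Int × Int) (i : Int) :
    List (Int × Int × Int) × Int × Int :=
  match PySem.List.pyGet? l i with
  | none => st
  | some v => if v ≠ st.2.2 then (st.1 ++ [(st.2.2, st.2.1, i - 1)], i, v) else st

def group_line_ranges_by_page (page_by_line : List Int) : List (Int × Int × Int) :=
  match page_by_line with
  | [] => []
  | p :: _ =>
    let st := (PySem.List.pyRange 1 (page_by_line.length) 1).foldl (pvStepA page_by_line) ([], 0, p)
    st.1 ++ [(st.2.2, st.2.1, (page_by_line.length : Int) - 1)]

-- ===== PORT B =====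
-- inner 'while j < n and page_by_line[j] == page_by_line[i]: j += 1'
def pvScan (l : List Int) (p : Int) (j : Nat) : Nat :=
  if h : j < l.length then
    if l[j] = p then pvScan l p (j + 1) else j
  else j
termination_by l.length - j

-- the port's outer loop needs this for termination (j strictly advances past i)
theorem le_pvScan (l : List Int) (p : Int) (j : Nat) : j ≤ pvScan l p j := by
  unfold pvScan
  split
  · split
    · have := le_pvScan l p (j + 1); omega
    · exact le_refl j
  · exact le_refl j
termination_by l.length - j

-- outer 'while i < n' loop accumulating out
def pvOuter (l : List Int) (i : Nat) (out : List (Int × Int × Int)) : List (Int × Int × Int) :=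
  if h : i < l.length then
    let j := pvScan l l[i] (i + 1)
    pvOuter l j (out ++ [(l[i], (i : Int), (j : Int) - 1)])
  else out
termination_by l.length - i
decreasing_by
  have := le_pvScan l l[i] (i + 1)
  omega

def group_line_ranges_by_page_alt (page_by_line : List Int) : List (Int × Int × Int) :=
  pvOuter page_by_line 0 []

-- ===== PRECONDITION & SPEC =====
def Spec_group_line_ranges_by_page (page_by_line : List Int) (out : List (Int × Int × Int)) : Prop := out = group_line_ranges_by_page_alt page_by_line
instance (page_by_line : List Int) (out : List (Int × Int × Int)) : Decidable (Spec_group_line_ranges_by_page page_by_line out) := by unfold Spec_group_line_ranges_by_page; infer_instance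

-- ===== CLAIM (what is proved, stated in full; the proofs are below) =====
def Claim_equal_group_line_ranges_by_page : Prop := ∀ (page_by_line : List Int), Dom_group_line_ranges_by_page page_by_line → Spec_group_line_ranges_by_page page_by_line (group_line_ranges_by_page page_by_line)

-- ===== LEMMAS AND PROOFS =====
-- length of the leading run of elements equal to p (proof-side view of pvScan)
def pvRunLen (p : Int) : List Int → Nat
  | [] => 0
  | x :: xs => if x = p then pvRunLen p xs + 1 else 0

theorem pvRunLen_le (p : Int) (xs : List Int) : pvRunLen p xs ≤ xs.length := by
  induction xs with
  | nil => simp [pvRunLen]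
  | cons x xs ih =>
    simp only [pvRunLen, List.length_cons]
    split
    · omega
    · omega

-- proof-side view of B: recursion on the list peeling off the leading run
def pvGo : List Int → Int → List (Int × Int × Int)
  | [], _ => []
  | p :: rest, i =>
    let k := pvRunLen p rest
    (p, i, i + (k : Int)) :: pvGo (rest.drop k) (i + (k : Int) + 1)
termination_by xs _ => xs.length
decreasing_by
  simp only [List.length_drop, List.length_cons]
  omega

theorem pvScan_eq_runLen (l : List Int) (p : Int) : ∀ (d j : Nat), l.length - j = d →
    pvScan l p j = j + pvRunLen p (l.drop j) := by
  intro d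
  induction d with
  | zero =>
    intro j h
    have hle : l.length ≤ j := by omega
    rw [pvScan, List.drop_eq_nil_of_le hle]
    simp [pvRunLen]
    omega
  | succ d ih =>
    intro j h
    have hj : j < l.length := by omega
    rw [pvScan, List.drop_eq_getElem_cons hj]
    simp only [hj, dite_true, pvRunLen]
    by_cases hx : l[j] = p
    · simp only [hx, if_true]
      rw [ih (j + 1) (by omega)]
      omega
    · simp only [hx, if_false]
      omega

theorem pvOuter_eq_go (l : List Int) : ∀ (d i : Nat) (out : List (Int × Int × Int)),
    l.length - i ≤ d → i ≤ l.length →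
    pvOuter l i out = out ++ pvGo (l.drop i) (i : Int) := by
  intro d
  induction d with
  | zero =>
    intro i out h hle
    have hni : l.length ≤ i := by omega
    rw [pvOuter, dif_neg (by omega), List.drop_eq_nil_of_le hni, pvGo]
    simp
  | succ d ih =>
    intro i out h hle
    by_cases hi : i < l.length
    · rw [pvOuter]
      simp only [hi, dite_true]
      have hscan := pvScan_eq_runLen l l[i] (l.length - (i + 1)) (i + 1) rfl
      set k := pvRunLen l[i] (l.drop (i + 1)) with hk
      have hkle : k ≤ l.length - (i + 1) := by
        have := pvRunLen_le l[i] (l.drop (i + 1))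
        simpa using this
      rw [hscan]
      rw [ih (i + 1 + k) (out ++ [(l[i], (i : Int), ((i + 1 + k : Nat) : Int) - 1)]) (by omega) (by omega)]
      rw [List.drop_eq_getElem_cons hi, pvGo]
      simp only [List.drop_drop]
      have harith1 : ((i + 1 + k : Nat) : Int) - 1 = (i : Int) + (k : Int) := by push_cast; ring
      have harith2 : ((i + 1 + k : Nat) : Int) = (i : Int) + (k : Int) + 1 := by push_cast; ring
      rw [harith1, harith2]
      simp only [← hk, List.append_assoc, List.cons_append, List.nil_append]
    · have hni : l.length ≤ i := by omega
      rw [pvOuter, dif_neg (by omega), List.drop_eq_nil_of_le hni, pvGo]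
      simp

-- A's loop, re-expressed as a structural recursion over the tail of the list carrying the current index
def pvFoldTail : List Int → Int → List (Int × Int × Int) × Int × Int → List (Int × Int × Int) × Int × Int
  | [], _, st => st
  | x :: rest, i, st =>
    pvFoldTail rest (i + 1) (if x ≠ st.2.2 then (st.1 ++ [(st.2.2, st.2.1, i - 1)], i, x) else st)

theorem pvBridge (l : List Int) : ∀ (d j : Nat) (st : List (Int × Int × Int) × Int × Int),
    l.length - j = d →
    (PySem.List.pyRange (j : Int) (l.length : Int) 1).foldl (pvStepA l) st
      = pvFoldTail (l.drop j) (j : Int) st := by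
  intro d
  induction d with
  | zero =>
    intro j st h
    have hle : l.length ≤ j := by omega
    rw [PySem.List.pyRange_one_eq_nil (by exact_mod_cast hle)]
    rw [List.drop_eq_nil_of_le hle]
    rfl
  | succ d ih =>
    intro j st h
    have hj : j < l.length := by omega
    rw [PySem.List.pyRange_one_cons (by exact_mod_cast hj)]
    rw [List.drop_eq_getElem_cons hj]
    simp only [List.foldl_cons, pvFoldTail]
    have hget : PySem.List.pyGet? l (j : Int) = some l[j] := by
      rw [PySem.List.pyGet?_natCast]
      exact List.getElem?_eq_getElem hj
    have hstep : pvStepA l st (j : Int)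
        = (if l[j] ≠ st.2.2 then (st.1 ++ [(st.2.2, st.2.1, (j : Int) - 1)], (j : Int), l[j]) else st) := by
      simp [pvStepA, hget]
    rw [hstep]
    have := ih (j + 1) (if l[j] ≠ st.2.2 then (st.1 ++ [(st.2.2, st.2.1, (j : Int) - 1)], (j : Int), l[j]) else st) (by omega)
    push_cast at this ⊢
    exact this

-- A's finishing step applied after the loop over 'tail' starting at index i
def pvFinish (tail : List Int) (i : Int) (st : List (Int × Int × Int) × Int × Int) : List (Int × Int × Int) :=
  let r := pvFoldTail tail i st
  r.1 ++ [(r.2.2, r.2.1, i + (tail.length : Int) - 1)]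

theorem pvMain : ∀ (tail : List Int) (i start p : Int) (out : List (Int × Int × Int)),
    pvFinish tail i (out, start, p)
      = out ++ (p, start, i + (pvRunLen p tail : Int) - 1)
              :: pvGo (tail.drop (pvRunLen p tail)) (i + (pvRunLen p tail : Int)) := by
  intro tail
  induction tail with
  | nil =>
    intro i start p out
    simp [pvFinish, pvFoldTail, pvRunLen, pvGo]
  | cons x rest ih =>
    intro i start p out
    by_cases hx : x = p
    · subst hx
      have hstep : pvFinish (x :: rest) i (out, start, x)
          = pvFinish rest (i + 1) (out, start, x) := by
        simp [pvFinish, pvFoldTail]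
        ring_nf
      rw [hstep, ih]
      have hk : pvRunLen x (x :: rest) = pvRunLen x rest + 1 := by simp [pvRunLen]
      rw [hk]
      simp only [List.drop_succ_cons]
      push_cast
      ring_nf
    · have hstep : pvFinish (x :: rest) i (out, start, p)
          = pvFinish rest (i + 1) (out ++ [(p, start, i - 1)], i, x) := by
        simp [pvFinish, pvFoldTail, hx]
        ring_nf
      rw [hstep, ih]
      have hk : pvRunLen p (x :: rest) = 0 := by simp [pvRunLen, hx]
      rw [hk]
      simp only [List.drop_zero, Nat.cast_zero, add_zero]
      rw [pvGo]
      simp only [List.append_assoc, List.cons_append, List.nil_append]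
      have h1 : i + 1 + (pvRunLen x rest : Int) - 1 = i + (pvRunLen x rest : Int) := by ring
      have h2 : i + 1 + (pvRunLen x rest : Int) = i + (pvRunLen x rest : Int) + 1 := by ring
      rw [h1, h2]

theorem group_line_ranges_by_page_eq_alt (l : List Int) :
    group_line_ranges_by_page l = group_line_ranges_by_page_alt l := by
  cases l with
  | nil =>
    show ([] : List (Int × Int × Int)) = pvOuter [] 0 []
    rw [pvOuter]
    simp
  | cons p xs =>
    have hb := pvBridge (p :: xs) xs.length 1 ([], 0, p) (by simp)
    simp only [Nat.cast_one] at hb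
    have hfin : group_line_ranges_by_page (p :: xs) = pvFinish xs 1 ([], 0, p) := by
      simp only [group_line_ranges_by_page, pvFinish]
      rw [hb]
      simp only [List.drop_one, List.tail_cons, List.length_cons]
      push_cast
      ring_nf
    rw [hfin, pvMain]
    simp only [group_line_ranges_by_page_alt]
    rw [pvOuter_eq_go (p :: xs) (p :: xs).length 0 [] (by omega) (by omega)]
    simp only [List.drop_zero, List.nil_append, CharP.cast_eq_zero]
    rw [pvGo]
    have h1 : (1 : Int) + (pvRunLen p xs : Int) - 1 = 0 + (pvRunLen p xs : Int) := by ring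
    have h2 : (1 : Int) + (pvRunLen p xs : Int) = 0 + (pvRunLen p xs : Int) + 1 := by ring
    rw [h1, h2]

-- ===== VERDICT (by name: the statement is the Claim_ definition above) =====
theorem group_line_ranges_by_page_spec : Claim_equal_group_line_ranges_by_page := by
  intro l _
  unfold Spec_group_line_ranges_by_page
  exact group_line_ranges_by_page_eq_alt l
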